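-- pv_equiv track=rewrite | github.com/OGHeyDude/Dev-Agency | tools/context_optimizer/pruning/generic_pruner.py | _count_repetitive_blocks
-- ===== SOURCE A (Python) =====
-- def _count_repetitive_blocks(content: str) -> int:
--     """Count blocks of repetitive content."""
--     lines = content.splitlines()
--
--     # Simple heuristic: count lines that appear multiple times
--     line_counts = {}
--     for line in lines:
--         stripped = line.strip()
--         if stripped and len(stripped) > 10:
--             line_counts[stripped] = line_counts.get(stripped, 0) + 1
--
--     # Count repetitive occurrences (beyond the first 2)
--     repetitive_count = 0
--     for count in line_counts.values():
--         if count > 2: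
--             repetitive_count += count - 2
--
--     return repetitive_count
-- ===== SOURCE B (Python) =====
-- def _count_repetitive_blocks(content: str) -> int:
--     """Count blocks of repetitive content (single streaming pass)."""
--     seen = {}
--     repetitive = 0
--     for line in content.splitlines():
--         stripped = line.strip()
--         if stripped and len(stripped) > 10:
--             c = seen.get(stripped, 0)
--             if c >= 2:
--                 repetitive += 1
--             seen[stripped] = c + 1
--     return repetitive
-- ===== Notes on version B (the rewrite author's own statement) =====
-- stated objective: alternative
-- what changed: Replaces A's two-phase count-then-aggregate (build a full frequency dict, then loop over its values summing count-2) with a single streaming pass that keeps a running per-line counter and adds 1 whenever a qualifying line has already been seen at least twice.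
import Mathlib
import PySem

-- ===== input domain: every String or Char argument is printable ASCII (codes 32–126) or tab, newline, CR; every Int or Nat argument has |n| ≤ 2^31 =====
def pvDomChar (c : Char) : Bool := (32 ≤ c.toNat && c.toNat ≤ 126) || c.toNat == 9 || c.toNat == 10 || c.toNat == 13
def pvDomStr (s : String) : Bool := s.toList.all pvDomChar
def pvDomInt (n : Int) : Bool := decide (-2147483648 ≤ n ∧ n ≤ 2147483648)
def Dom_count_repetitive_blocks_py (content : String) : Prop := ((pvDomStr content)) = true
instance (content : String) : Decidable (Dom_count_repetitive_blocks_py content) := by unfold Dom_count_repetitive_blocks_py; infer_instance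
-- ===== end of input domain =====

-- B replaces A's count-then-aggregate two-phase loop by a single streaming pass with a running counter (same cost; alternative decomposition).

-- ===== PORT A =====
def count_repetitive_blocks_py (content : String) : Int :=
  let lines := PySem.Str.splitlines content
  let line_counts := lines.foldl (fun d line =>
    let stripped := PySem.Str.strip line
    if stripped ≠ "" ∧ PySem.Str.len stripped > 10 then
      d.insert stripped (d.getD stripped 0 + 1)
    else d) (PySem.Dict.empty : PySem.Dict String Int)
  line_counts.values.foldl (fun repetitive_count count =>
    if count > 2 then repetitive_count + (count - 2) else repetitive_count) 0

-- ===== PORT B =====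
def count_repetitive_blocks_py_alt (content : String) : Int :=
  ((PySem.Str.splitlines content).foldl (fun st line =>
    let stripped := PySem.Str.strip line
    if stripped ≠ "" ∧ PySem.Str.len stripped > 10 then
      let c := st.1.getD stripped 0
      (st.1.insert stripped (c + 1), if c ≥ 2 then st.2 + 1 else st.2)
    else st) ((PySem.Dict.empty : PySem.Dict String Int), (0 : Int))).2

-- ===== PRECONDITION & SPEC =====
def Spec_count_repetitive_blocks_py (content : String) (out : Int) : Prop := out = count_repetitive_blocks_py_alt content
instance (content : String) (out : Int) : Decidable (Spec_count_repetitive_blocks_py content out) := by unfold Spec_count_repetitive_blocks_py; infer_instance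

-- ===== CLAIM (what is proved, stated in full; the proofs are below) =====
def Claim_equal_count_repetitive_blocks_py : Prop := ∀ (content : String), Dom_count_repetitive_blocks_py content → Spec_count_repetitive_blocks_py content (count_repetitive_blocks_py content)

-- ===== LEMMAS AND PROOFS =====

-- f(count) = the contribution of one distinct line with this final count
def pvFrep (c : Int) : Int := if c > 2 then c - 2 else 0

theorem pvFrep_succ (c : Int) : pvFrep (c + 1) = pvFrep c + (if c ≥ 2 then 1 else 0) := by
  unfold pvFrep; split_ifs <;> omega

-- A's second loop is the sum of pvFrep over the values
theorem pvFoldA_eq_sum (l : List Int) (a : Int) :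
    l.foldl (fun acc c => if c > 2 then acc + (c - 2) else acc) a = a + (l.map pvFrep).sum := by
  induction l generalizing a with
  | nil => simp
  | cons x t ih => simp only [List.foldl_cons, List.map_cons, List.sum_cons, ih]
                   unfold pvFrep; split_ifs <;> ring

-- summing a function over a nodup key list after changing it at one member key
theorem pvSum_update (keys : List String) (g g' : String → Int) (s : String)
    (hnd : keys.Nodup) (hs : s ∈ keys) (hne : ∀ k, k ≠ s → g' k = g k) :
    (keys.map g').sum = (keys.map g).sum + (g' s - g s) := by
  induction keys with
  | nil => cases hs
  | cons k t ih =>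
    rcases List.nodup_cons.mp hnd with ⟨hk, hndt⟩
    simp only [List.map_cons, List.sum_cons]
    rcases List.mem_cons.mp hs with h | h
    · subst h
      have : ∀ x ∈ t, g' x = g x := fun x hx => hne x (fun e => hk (e ▸ hx))
      have hmap : t.map g' = t.map g := List.map_congr_left this
      rw [hmap]; ring
    · rw [hne k (fun e => hk (e ▸ h)), ih hndt h]; ring

-- inserting stripped with its count+1 raises the pvFrep-sum by 1 exactly when the old count was ≥ 2
theorem pvSum_insert (d : PySem.Dict String Int) (hnd : d.keys.Nodup) (s : String) :
    ((d.insert s (d.getD s 0 + 1)).values.map pvFrep).sum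
      = (d.values.map pvFrep).sum + (if d.getD s 0 ≥ 2 then 1 else 0) := by
  set c := d.getD s 0 with hc
  have hnd' : (d.insert s (c + 1)).keys.Nodup := PySem.Dict.nodup_keys_insert d s (c + 1) hnd
  rw [PySem.Dict.values_eq_map_keys (d.insert s (c + 1)) hnd' 0,
      PySem.Dict.values_eq_map_keys d hnd 0]
  by_cases hmem : d.contains s
  · rw [PySem.Dict.keys_insert_of_contains d (c + 1) hmem]
    simp only [List.map_map, Function.comp_def]
    have hsk : s ∈ d.keys := (PySem.Dict.contains_iff_mem_keys d s).mp hmem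
    rw [pvSum_update d.keys (fun k => pvFrep (d.getD k 0))
        (fun k => pvFrep ((d.insert s (c + 1)).getD k 0)) s hnd hsk
        (by intro k hk; simp [PySem.Dict.getD_insert, hk])]
    have h1 : (d.insert s (c + 1)).getD s 0 = c + 1 := by simp
    rw [h1, pvFrep_succ]
    ring
  · have hcf : d.contains s = false := by simpa using hmem
    have hc0 : c = 0 := by rw [hc]; exact PySem.Dict.getD_of_not_contains d 0 hcf
    rw [PySem.Dict.keys_insert_of_not_contains d (c + 1) hcf]
    simp only [List.map_append, List.sum_append, List.map_map, Function.comp_def]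
    have hmap : d.keys.map (fun k => pvFrep ((d.insert s (c + 1)).getD k 0))
        = d.keys.map (fun k => pvFrep (d.getD k 0)) := by
      apply List.map_congr_left
      intro k hk
      have hks : k ≠ s := by
        intro e; subst e
        exact absurd ((PySem.Dict.contains_iff_mem_keys d k).mpr hk) (by simp [hcf])
      simp [PySem.Dict.getD_insert, hks]
    rw [hmap, hc0]
    simp [pvFrep]

-- loop invariant: B's running total is the pvFrep-sum over A's dict-so-far
theorem pvLoop (lines : List String) (d : PySem.Dict String Int) (rep : Int)
    (hnd : d.keys.Nodup) (hrep : rep = (d.values.map pvFrep).sum) :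
    (lines.foldl (fun st line =>
        let stripped := PySem.Str.strip line
        if stripped ≠ "" ∧ PySem.Str.len stripped > 10 then
          let c := st.1.getD stripped 0
          (st.1.insert stripped (c + 1), if c ≥ 2 then st.2 + 1 else st.2)
        else st) (d, rep)).2
      = (((lines.foldl (fun d line =>
          let stripped := PySem.Str.strip line
          if stripped ≠ "" ∧ PySem.Str.len stripped > 10 then
            d.insert stripped (d.getD stripped 0 + 1)
          else d) d).values).map pvFrep).sum := by
  induction lines generalizing d rep with
  | nil => simpa using hrep
  | cons line t ih =>
    simp only [List.foldl_cons]
    by_cases h : PySem.Str.strip line ≠ "" ∧ PySem.Str.len (PySem.Str.strip line) > 10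
    · simp only [if_pos h]
      exact ih (d.insert (PySem.Str.strip line) (d.getD (PySem.Str.strip line) 0 + 1))
        _ (PySem.Dict.nodup_keys_insert d _ _ hnd)
        (by rw [hrep, pvSum_insert d hnd (PySem.Str.strip line)]; split_ifs <;> ring)
    · simp only [if_neg h]
      exact ih d rep hnd hrep

-- ===== VERDICT (by name: the statement is the Claim_ definition above) =====
theorem count_repetitive_blocks_py_spec : Claim_equal_count_repetitive_blocks_py := by
  intro content _
  unfold Spec_count_repetitive_blocks_py count_repetitive_blocks_py count_repetitive_blocks_py_alt
  rw [pvFoldA_eq_sum, pvLoop (PySem.Str.splitlines content) PySem.Dict.empty 0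
      PySem.Dict.nodup_keys_empty (by decide)]
  simp
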